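-- pv_equiv track=rewrite | github.com/valentinlageard/melodendron | melodendron/model/utils.py | get_plagiarism_counts
-- ===== SOURCE A (Python) =====
-- def get_plagiarism_counts(state_sequence):
--     counts = list()
--     count = 0
--     for i in range(len(state_sequence) - 1):
--         if state_sequence[i]['id'] == state_sequence[i + 1]['id'] - 1:
--             count += 1
--         else:
--             counts.append(count)
--             count = 0
--     return counts
-- ===== SOURCE B (Python) =====
-- def get_plagiarism_counts(state_sequence):
--     # Stage 1: one boolean flag per adjacent pair (True = ids are consecutive).
--     flags = [a['id'] == b['id'] - 1
--              for a, b in zip(state_sequence, state_sequence[1:])]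
--     # Stage 2: walk the flags BACKWARD, building run lengths last-run-first;
--     # the trailing run never gets an entry, so it is dropped for free.
--     rev = []
--     for f in reversed(flags):
--         if f:
--             if rev:
--                 rev[-1] += 1   # extend the most recently started run
--         else:
--             rev.append(0)      # a break starts a new (empty) run
--     return rev[::-1]
-- ===== Notes on version B (the rewrite author's own statement) =====
-- stated objective: alternative
-- what changed: B first materialises a boolean flag per adjacent pair (zip with the tail), then recovers the run lengths in a backward pass that builds the output last-run-first and reverses it, so the trailing run is dropped implicitly instead of by A's forward counter that is appended and reset at each break.
import Mathlib
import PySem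

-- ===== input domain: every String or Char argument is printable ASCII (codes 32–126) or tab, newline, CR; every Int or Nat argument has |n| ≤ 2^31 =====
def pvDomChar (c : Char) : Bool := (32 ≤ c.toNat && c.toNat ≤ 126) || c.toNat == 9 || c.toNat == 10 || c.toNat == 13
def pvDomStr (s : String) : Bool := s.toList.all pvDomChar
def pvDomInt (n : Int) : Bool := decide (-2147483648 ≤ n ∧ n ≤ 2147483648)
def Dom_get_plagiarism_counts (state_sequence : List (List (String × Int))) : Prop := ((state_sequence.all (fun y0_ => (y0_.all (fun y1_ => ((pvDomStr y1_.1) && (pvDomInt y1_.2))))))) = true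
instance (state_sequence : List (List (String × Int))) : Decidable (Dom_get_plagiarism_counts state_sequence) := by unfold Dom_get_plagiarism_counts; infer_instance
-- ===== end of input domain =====

-- B materialises a flag per adjacent pair (zip with tail) and recovers run lengths in a
-- backward pass building the output last-run-first; objective: alternative (same cost).


-- ===== PORT A =====
-- state_sequence[i]['id'] raises KeyError when the key is absent; Pre_ excludes that,
-- so the total form ((Dict.mk …).get? "id").getD 0 is exact on the admitted inputs.
def get_plagiarism_counts (state_sequence : List (List (String × Int))) : List Int :=
  ((PySem.List.pyRange 0 ((state_sequence.length : Int) - 1) 1).foldl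
    (fun (st : List Int × Int) i =>
      if ((PySem.Dict.mk (PySem.List.pyGetD state_sequence i [])).get? "id").getD 0 =
         ((PySem.Dict.mk (PySem.List.pyGetD state_sequence (i + 1) [])).get? "id").getD 0 - 1
      then (st.1, st.2 + 1)
      else (st.1 ++ [st.2], 0)) ([], 0)).1

-- ===== PORT B =====
-- rev[-1] += 1 of Source B: modify the last element of a (nonempty) list, else leave [] alone.
def pvBumpLast : List Int → List Int
  | [] => []
  | [x] => [x + 1]
  | x :: y :: r => x :: pvBumpLast (y :: r)

def get_plagiarism_counts_alt (state_sequence : List (List (String × Int))) : List Int :=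
  let flags := (state_sequence.zip state_sequence.tail).map (fun p =>
    ((PySem.Dict.mk p.1).get? "id").getD 0 == ((PySem.Dict.mk p.2).get? "id").getD 0 - 1)
  (flags.reverse.foldl
    (fun rev f => if f then pvBumpLast rev else rev ++ [0]) []).reverse

-- ===== PRECONDITION & SPEC =====
-- Pre_ excludes exactly the inputs where the Python A raises KeyError: with ≥ 2 elements
-- the loop reads 'id' from every element, so every element must carry the key; with ≤ 1
-- elements nothing is read and the loop body never runs.
def Pre_get_plagiarism_counts (state_sequence : List (List (String × Int))) : Prop :=
  state_sequence.length ≤ 1 ∨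
    ∀ d ∈ state_sequence, ((PySem.Dict.mk d).get? "id").isSome = true
instance (state_sequence : List (List (String × Int))) : Decidable (Pre_get_plagiarism_counts state_sequence) := by unfold Pre_get_plagiarism_counts; infer_instance

def pvWitness_get_plagiarism_counts : (List (List (String × Int))) :=
  [[("id", 1)], [("id", 2)], [("id", 7)]]

def Spec_get_plagiarism_counts (state_sequence : List (List (String × Int))) (out : List Int) : Prop := out = get_plagiarism_counts_alt state_sequence
instance (state_sequence : List (List (String × Int))) (out : List Int) : Decidable (Spec_get_plagiarism_counts state_sequence out) := by unfold Spec_get_plagiarism_counts; infer_instance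

-- ===== CLAIM (what is proved, stated in full; the proofs are below) =====
def Claim_equal_get_plagiarism_counts : Prop := ∀ (state_sequence : List (List (String × Int))), Dom_get_plagiarism_counts state_sequence → Pre_get_plagiarism_counts state_sequence → Spec_get_plagiarism_counts state_sequence (get_plagiarism_counts state_sequence)

-- ===== LEMMAS AND PROOFS =====

-- Reference run-length splitter over the flag list (head-first), used to relate both ports.
def pvSplit : List Bool → List Int
  | [] => []
  | false :: t => 0 :: pvSplit t
  | true :: t => match pvSplit t with
    | [] => []
    | x :: r => (x + 1) :: r

-- add c to the head, if any
def pvBump (c : Int) : List Int → List Int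
  | [] => []
  | x :: r => (x + c) :: r

theorem pvBump_zero (l : List Int) : pvBump 0 l = l := by
  cases l <;> simp [pvBump]

theorem pvBumpLast_concat (l : List Int) (x : Int) :
    pvBumpLast (l ++ [x]) = l ++ [x + 1] := by
  induction l with
  | nil => rfl
  | cons a t ih =>
      cases t with
      | nil => rfl
      | cons b r => simpa [pvBumpLast] using ih

-- A's loop, over an arbitrary flag list with accumulator, computes pvSplit.
theorem pvLoop_split (fs : List Bool) (c : Int) (acc : List Int) :
    (fs.foldl (fun (st : List Int × Int) f =>
        if f then (st.1, st.2 + 1) else (st.1 ++ [st.2], 0)) (acc, c)).1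
      = acc ++ pvBump c (pvSplit fs) := by
  induction fs generalizing c acc with
  | nil => simp [pvSplit, pvBump]
  | cons f t ih =>
      cases f with
      | true =>
          simp only [List.foldl_cons, if_true]
          rw [ih]
          cases h : pvSplit t with
          | nil => simp [pvSplit, h, pvBump]
          | cons x r =>
              simp only [pvSplit, h, pvBump]
              congr 2
              ring
      | false =>
          simp only [List.foldl_cons, Bool.false_eq_true, if_false]
          rw [ih, pvBump_zero]
          simp [pvSplit, pvBump]

-- B's backward pass computes pvSplit as well.
theorem pvBack_split (fs : List Bool) :
    (fs.reverse.foldl (fun rev f => if f then pvBumpLast rev else rev ++ [0]) []).reverse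
      = pvSplit fs := by
  rw [List.foldl_reverse]
  induction fs with
  | nil => rfl
  | cons f t ih =>
      cases f with
      | true =>
          simp only [List.foldr_cons, if_true]
          rcases List.eq_nil_or_concat (t.foldr (fun f rev => if f then pvBumpLast rev else rev ++ [0]) []) with h | ⟨l, x, h⟩
          · rw [h] at ih ⊢
            simp only [List.reverse_nil] at ih
            simp [pvSplit, ← ih, pvBumpLast]
          · rw [h] at ih ⊢
            rw [List.concat_eq_append, pvBumpLast_concat]
            rw [List.concat_eq_append] at ih
            simp only [List.reverse_append, List.reverse_cons, List.reverse_nil,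
              List.nil_append, List.singleton_append] at ih ⊢
            simp [pvSplit, ← ih]
      | false =>
          simp only [List.foldr_cons, Bool.false_eq_true, if_false]
          simp [pvSplit, ← ih]

-- indexed adjacent-pair map = zip-with-tail map
theorem pvRange_map_zip {α β : Type} (g : α → α → β) (d : α) :
    ∀ ss : List α,
      (List.range (ss.length - 1)).map (fun k => g (ss.getD k d) (ss.getD (k + 1) d))
        = (ss.zip ss.tail).map (fun p => g p.1 p.2)
  | [] => by simp
  | [x] => by simp
  | x :: y :: t => by
      have ih := pvRange_map_zip g d (y :: t)
      simp only [List.length_cons, Nat.add_sub_cancel] at ih ⊢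
      rw [List.range_succ_eq_map]
      simp only [List.map_cons, List.map_map, List.zip_cons_cons, List.tail_cons]
      refine congrArg₂ _ rfl ?_
      simpa using ih

-- ===== VERDICT (by name: the statement is the Claim_ definition above) =====
theorem get_plagiarism_counts_spec : Claim_equal_get_plagiarism_counts := by
  intro ss _dom _pre
  unfold Spec_get_plagiarism_counts get_plagiarism_counts get_plagiarism_counts_alt
  set P : Int → Bool := fun i =>
    (((PySem.Dict.mk (PySem.List.pyGetD ss i [])).get? "id").getD 0 ==
     ((PySem.Dict.mk (PySem.List.pyGetD ss (i + 1) [])).get? "id").getD 0 - 1) with hP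
  have hfold :
      (PySem.List.pyRange 0 ((ss.length : Int) - 1) 1).foldl
        (fun (st : List Int × Int) i =>
          if ((PySem.Dict.mk (PySem.List.pyGetD ss i [])).get? "id").getD 0 =
             ((PySem.Dict.mk (PySem.List.pyGetD ss (i + 1) [])).get? "id").getD 0 - 1
          then (st.1, st.2 + 1)
          else (st.1 ++ [st.2], 0)) ([], 0)
      = ((PySem.List.pyRange 0 ((ss.length : Int) - 1) 1).map P).foldl
        (fun (st : List Int × Int) f =>
          if f then (st.1, st.2 + 1) else (st.1 ++ [st.2], 0)) ([], 0) := by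
    rw [List.foldl_map]
    simp [hP]
  have hm : (((ss.length : Int)) - 1 - 0).toNat = ss.length - 1 := by omega
  have hflags :
      (PySem.List.pyRange 0 ((ss.length : Int) - 1) 1).map P
        = (ss.zip ss.tail).map (fun p =>
            ((PySem.Dict.mk p.1).get? "id").getD 0 ==
            ((PySem.Dict.mk p.2).get? "id").getD 0 - 1) := by
    rw [PySem.List.pyRange_one, hm, List.map_map,
        ← pvRange_map_zip (fun a b =>
            (((PySem.Dict.mk a).get? "id").getD 0 ==
             ((PySem.Dict.mk b).get? "id").getD 0 - 1)) ([] : List (String × Int)) ss]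
    refine List.map_congr_left (fun k _ => ?_)
    have h2 : ((k : Int) + 1) = ((k + 1 : Nat) : Int) := by push_cast; ring
    simp only [hP, Function.comp_apply, zero_add]
    rw [h2]
    simp only [PySem.List.pyGetD_natCast]
  rw [hfold, hflags, pvLoop_split, pvBump_zero, List.nil_append]
  exact (pvBack_split _).symm
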